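-- pv_equiv track=rewrite | github.com/Scherlac/JapaneseLessons | tools/internal_module_dependencies.py | shortest_group_path
-- ===== SOURCE A (Python) =====
-- from collections import deque
--
-- def shortest_path(
--     edges: dict[str, set[str]],
--     source: str,
--     target: str,
--     *,
--     allowed: set[str] | None = None,
-- ) -> list[str] | None:
--     if source == target:
--         return [source]
--
--     queue: deque[tuple[str, list[str]]] = deque([(source, [source])])
--     seen = {source}
--
--     while queue:
--         node, path = queue.popleft()
--         for neighbor in sorted(edges[node]):
--             if allowed is not None and neighbor not in allowed:
--                 continue
--             if neighbor in seen:
--                 continue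
--             new_path = [*path, neighbor]
--             if neighbor == target:
--                 return new_path
--             seen.add(neighbor)
--             queue.append((neighbor, new_path))
--
--     return None
--
-- def shortest_group_path(
--     edges: dict[str, set[str]],
--     modules: set[str],
--     package: str,
--     source_group: str,
--     target_group: str,
-- ) -> list[str] | None:
--     best: list[str] | None = None
--     sources = sorted(module for module in modules if module_group(module, package) == source_group)
--     targets = sorted(module for module in modules if module_group(module, package) == target_group)
--
--     for source in sources:
--         for target in targets:
--             path = shortest_path(edges, source, target)
--             if path is None:
--                 continue
--             if best is None or len(path) < len(best) or path < best:
--                 best = path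
--     return best
--
-- def module_group(module: str, package: str) -> str:
--     parts = module.split(".")
--     if module == package or len(parts) == 1:
--         return "(root)"
--     return parts[1]
-- ===== SOURCE B (Python) =====
-- # B: one parent-pointer BFS per source; paths rebuilt backwards from parents, all candidates collected, best picked in one final pass.
-- from collections import deque
--
--
-- def module_group(module: str, package: str) -> str:
--     parts = module.split(".")
--     if module == package or len(parts) == 1:
--         return "(root)"
--     return parts[1]
--
--
-- def _bfs_parents(edges, source):
--     """Single exhaustive BFS from source; returns dict node -> parent node (None for source)."""
--     parent = {source: None}
--     queue = deque([source])
--     while queue: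
--         node = queue.popleft()
--         for neighbor in sorted(edges[node]):
--             if neighbor not in parent:
--                 parent[neighbor] = node
--                 queue.append(neighbor)
--     return parent
--
--
-- def _rebuild(parent, target):
--     """Walk the parent pointers back from target and reverse."""
--     path = []
--     cur = target
--     while cur is not None:
--         path.append(cur)
--         cur = parent[cur]
--     path.reverse()
--     return path
--
--
-- def shortest_group_path(
--     edges,
--     modules,
--     package,
--     source_group,
--     target_group,
-- ):
--     sources = sorted(m for m in modules if module_group(m, package) == source_group)
--     targets = sorted(m for m in modules if module_group(m, package) == target_group)
--     if not sources or not targets: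
--         return None
--     candidates = []
--     for source in sources:
--         parent = _bfs_parents(edges, source)
--         for target in targets:
--             if target in parent:
--                 candidates.append(_rebuild(parent, target))
--     best = None
--     for path in candidates:
--         if best is None or len(path) < len(best) or path < best:
--             best = path
--     return best
-- ===== Notes on version B (the rewrite author's own statement) =====
-- stated objective: alternative
-- what changed: Replaces A's one path-carrying BFS per (source,target) pair with one parent-pointer BFS per source; each target's path is rebuilt backwards from the parent dict, all candidates are collected in a list, and the best is picked in a single final pass.
-- outside the precondition, e.g. on shortest_group_path({'x.s': {'x.t'}}, {'x.s', 'x.t'}, 'p', 's', 't'): A returns ['x.s', 'x.t'], B raises KeyError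
import Mathlib
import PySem

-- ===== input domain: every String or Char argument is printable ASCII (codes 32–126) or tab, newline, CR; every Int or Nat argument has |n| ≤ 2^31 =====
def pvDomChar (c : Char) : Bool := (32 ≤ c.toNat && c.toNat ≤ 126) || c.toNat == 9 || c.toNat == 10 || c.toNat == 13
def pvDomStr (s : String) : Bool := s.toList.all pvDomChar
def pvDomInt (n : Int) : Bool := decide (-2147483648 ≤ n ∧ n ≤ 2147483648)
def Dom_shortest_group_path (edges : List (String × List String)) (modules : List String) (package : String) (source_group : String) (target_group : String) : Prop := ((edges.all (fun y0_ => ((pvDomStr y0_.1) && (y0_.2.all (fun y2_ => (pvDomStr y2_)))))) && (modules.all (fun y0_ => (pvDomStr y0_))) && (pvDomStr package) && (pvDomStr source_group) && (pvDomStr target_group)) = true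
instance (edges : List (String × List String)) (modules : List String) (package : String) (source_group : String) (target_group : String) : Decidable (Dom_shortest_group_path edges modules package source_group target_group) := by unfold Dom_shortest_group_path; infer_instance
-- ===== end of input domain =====

-- ===== PORT A =====
-- B replaces A's per-(source,target)-pair path-carrying BFS by one parent-pointer BFS per source,
-- rebuilding each target's path backwards from the parents and picking the best candidate in one final pass (objective: alternative).
-- Shared helper (same-module helper used verbatim by both Pythons) and the shared sorted call.
def pvSortedStr (xs : List String) : List String := PySem.List.sorted xs (fun x => x) false

def module_group (module package : String) : String :=
  let parts := (PySem.Str.split? module ".").getD []  -- split? is none only for sep = ""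
  if module == package || parts.length == 1 then "(root)"
  else (PySem.List.pyGet? parts 1).getD ""  -- parts[1]; the default is unreachable: split produces ≥ 1 part, and the branch needs length ≠ 1

-- Python list[str] comparison 'path < best' (lexicographic, element-wise by code points)
def pyStrListLt : List String → List String → Bool
  | _, [] => false
  | [], _ :: _ => true
  | a :: as, b :: bs => if a < b then true else if b < a then false else pyStrListLt as bs

-- 'if best is None or len(path) < len(best) or path < best: best = path'
def pickBest (best : Option (List String)) (p : List String) : Option (List String) :=
  match best with
  | none => some p
  | some b => if p.length < b.length || pyStrListLt p b then some p else some b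

-- fuel: one unit per queue pop; pops ≤ pushes ≤ 1 + total neighbor count (pushed nodes are distinct neighbors)
def pvFuel (edges : List (String × List String)) : Nat := 1 + (edges.map (fun p => p.2.length)).sum

-- A's inner 'for neighbor in sorted(edges[node])' loop: either returns the found path (inl) or the updated (seen, queue)
def spInner (target : String) (path : List String) :
    List String → List String → List (String × List String) →
    (List String) ⊕ (List String × List (String × List String))
  | [], seen, q => Sum.inr (seen, q)
  | n :: ns, seen, q =>
    if seen.contains n then spInner target path ns seen q
    else if n == target then Sum.inl (path ++ [n])
    else spInner target path ns (seen ++ [n]) (q ++ [(n, path ++ [n])])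

-- A's 'while queue' loop
def spLoop (edges : List (String × List String)) (target : String) :
    Nat → List (String × List String) → List String → Option (List String)
  | 0, _, _ => none
  | _ + 1, [], _ => none
  | fuel + 1, (node, path) :: qs, seen =>
    match (PySem.Dict.mk edges).get? node with
    | none => none  -- Python raises KeyError here; such inputs are outside Pre_
    | some ns =>
      match spInner target path (pvSortedStr ns) seen qs with
      | Sum.inl p => some p
      | Sum.inr (seen', q') => spLoop edges target fuel q' seen'

def shortest_path (edges : List (String × List String)) (source target : String) : Option (List String) :=
  if source == target then some [source]
  else spLoop edges target (pvFuel edges) [(source, [source])] [source]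

def shortest_group_path (edges : List (String × List String)) (modules : List String) (package : String) (source_group : String) (target_group : String) : Option (List String) :=
  let sources := pvSortedStr (modules.filter (fun m => module_group m package == source_group))
  let targets := pvSortedStr (modules.filter (fun m => module_group m package == target_group))
  sources.foldl (fun best s =>
    targets.foldl (fun best t =>
      match shortest_path edges s t with
      | none => best
      | some p => pickBest best p) best) none

-- ===== PORT B =====
-- B's 'while queue' loop of _bfs_parents; the inner 'for neighbor in sorted(edges[node])' loop is the foldl over (parent, queue)
def pbLoop (edges : List (String × List String)) :
    Nat → List String → PySem.Dict String (Option String) → PySem.Dict String (Option String)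
  | 0, _, parent => parent
  | _ + 1, [], parent => parent
  | fuel + 1, node :: qs, parent =>
    match (PySem.Dict.mk edges).get? node with
    | none => parent  -- Python raises KeyError here; such inputs are outside Pre_
    | some ns =>
      let st := (pvSortedStr ns).foldl
        (fun st n => if st.1.contains n then st else (st.1.insert n (some node), st.2 ++ [n]))
        (parent, qs)
      pbLoop edges fuel st.2 st.1

def bfs_parents (edges : List (String × List String)) (source : String) : PySem.Dict String (Option String) :=
  pbLoop edges (pvFuel edges) [source] (PySem.Dict.empty.insert source none)

-- _rebuild's 'while cur is not None' walk; prepending to acc replaces Python's append-then-reverse;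
-- fuel bounds the parent-chain walk (the chain visits distinct keys, so keys.length + 1 steps suffice)
def rbGo (parent : PySem.Dict String (Option String)) : Nat → Option String → List String → List String
  | 0, _, acc => acc
  | _ + 1, none, acc => acc
  | fuel + 1, some c, acc => rbGo parent fuel ((parent.get? c).getD none) (c :: acc)  -- parent[c]; present for every chain node

def rebuild (parent : PySem.Dict String (Option String)) (target : String) : List String :=
  rbGo parent (parent.keys.length + 1) (some target) []

def shortest_group_path_alt (edges : List (String × List String)) (modules : List String) (package : String) (source_group : String) (target_group : String) : Option (List String) :=
  let sources := pvSortedStr (modules.filter (fun m => module_group m package == source_group))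
  let targets := pvSortedStr (modules.filter (fun m => module_group m package == target_group))
  if sources.isEmpty || targets.isEmpty then none
  else
    let candidates := sources.foldl (fun cand s =>
      let parent := bfs_parents edges s
      targets.foldl (fun cand t =>
        if parent.contains t then cand ++ [rebuild parent t] else cand) cand) []
    candidates.foldl (fun best p =>
      match best with
      | none => some p
      | some b => if p.length < b.length || pyStrListLt p b then some p else some b) none

-- ===== PRECONDITION & SPEC =====
-- Pre_ excludes inputs whose graph is not closed over its keys (a module or listed neighbor without an edges entry,
-- unless one of the two groups is empty): there Python A's per-pair BFS raises KeyError on some pair, or returns a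
-- path only because it finds its target before dequeuing the missing node, while B's exhaustive BFS raises KeyError.
def Pre_shortest_group_path (edges : List (String × List String)) (modules : List String) (package : String) (source_group : String) (target_group : String) : Prop :=
  (∀ m ∈ modules, module_group m package ≠ source_group) ∨
  (∀ m ∈ modules, module_group m package ≠ target_group) ∨
  ((∀ m ∈ modules, (PySem.Dict.mk edges).contains m = true) ∧
   (∀ p ∈ edges, ∀ n ∈ p.2, (PySem.Dict.mk edges).contains n = true))
instance (edges : List (String × List String)) (modules : List String) (package : String) (source_group : String) (target_group : String) : Decidable (Pre_shortest_group_path edges modules package source_group target_group) := by unfold Pre_shortest_group_path; infer_instance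

def pvWitness_shortest_group_path : (List (String × List String)) × List String × String × String × String :=
  ([("x.s", ["x.t"]), ("x.t", [])], ["x.s", "x.t"], "p", "s", "t")

def Spec_shortest_group_path (edges : List (String × List String)) (modules : List String) (package : String) (source_group : String) (target_group : String) (out : Option (List String)) : Prop := out = shortest_group_path_alt edges modules package source_group target_group
instance (edges : List (String × List String)) (modules : List String) (package : String) (source_group : String) (target_group : String) (out : Option (List String)) : Decidable (Spec_shortest_group_path edges modules package source_group target_group out) := by unfold Spec_shortest_group_path; infer_instance

-- ===== CLAIM (what is proved, stated in full; the proofs are below) =====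
def Claim_equal_shortest_group_path : Prop := ∀ (edges : List (String × List String)) (modules : List String) (package : String) (source_group : String) (target_group : String), Dom_shortest_group_path edges modules package source_group target_group → Pre_shortest_group_path edges modules package source_group target_group → Spec_shortest_group_path edges modules package source_group target_group (shortest_group_path edges modules package source_group target_group)

-- ===== LEMMAS AND PROOFS =====

-- Proof layer: an intermediate path-dict BFS (the same queue discipline as B's parent BFS, but storing
-- whole paths like A does). A is related to it by lock-step simulation; B's parents rebuild exactly its paths.
def midInner (base : List String) :
    List String → PySem.Dict String (List String) → List String →
    PySem.Dict String (List String) × List String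
  | [], paths, q => (paths, q)
  | n :: ns, paths, q =>
    if paths.contains n then midInner base ns paths q
    else midInner base ns (paths.insert n (base ++ [n])) (q ++ [n])

def midLoop (edges : List (String × List String)) :
    Nat → List String → PySem.Dict String (List String) → PySem.Dict String (List String)
  | 0, _, paths => paths
  | _ + 1, [], paths => paths
  | fuel + 1, node :: qs, paths =>
    match (PySem.Dict.mk edges).get? node with
    | none => paths
    | some ns =>
      let base := (paths.get? node).getD []
      match midInner base (pvSortedStr ns) paths qs with
      | (paths', q') => midLoop edges fuel q' paths'

def mid_paths (edges : List (String × List String)) (source : String) : PySem.Dict String (List String) :=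
  midLoop edges (pvFuel edges) [source] (PySem.Dict.empty.insert source [source])

-- A's queue, reconstructed from the mid queue and the mid path dict
def qmap (paths : PySem.Dict String (List String)) (q : List String) : List (String × List String) :=
  q.map (fun n => (n, (paths.get? n).getD []))

-- keys already in the dict keep their value through midInner (it only inserts absent keys)
theorem midInner_stable (base : List String) :
    ∀ (l : List String) (paths : PySem.Dict String (List String)) (q : List String)
      (k : String) (v : List String), paths.get? k = some v →
      ((midInner base l paths q).1).get? k = some v := by
  intro l
  induction l with
  | nil => intro paths q k v h; simpa [midInner] using h
  | cons n ns ih =>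
    intro paths q k v h
    by_cases hc : paths.contains n = true
    · simpa [midInner, hc] using ih paths q k v h
    · have hkn : k ≠ n := by
        intro he
        rw [PySem.Dict.contains_eq_isSome_get?, ← he, h] at hc
        simp at hc
      have h' : (paths.insert n (base ++ [n])).get? k = some v := by
        rw [PySem.Dict.get?_insert_of_ne _ _ hkn]; exact h
      simpa [midInner, hc] using ih _ (q ++ [n]) k v h'

-- and through midLoop
theorem midLoop_stable (edges : List (String × List String)) :
    ∀ (f : Nat) (q : List String) (paths : PySem.Dict String (List String))
      (k : String) (v : List String), paths.get? k = some v →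
      (midLoop edges f q paths).get? k = some v := by
  intro f
  induction f with
  | zero => intro q paths k v h; simpa [midLoop] using h
  | succ f ih =>
    intro q paths k v h
    cases q with
    | nil => simpa [midLoop] using h
    | cons node qs =>
      cases hg : (PySem.Dict.mk edges).get? node with
      | none => simpa [midLoop, hg] using h
      | some ns =>
        rcases hrun : midInner ((paths.get? node).getD []) (pvSortedStr ns) paths qs with ⟨paths', q'⟩
        have hst := midInner_stable ((paths.get? node).getD []) (pvSortedStr ns) paths qs k v h
        rw [hrun] at hst
        have hstep : midLoop edges (f + 1) (node :: qs) paths = midLoop edges f q' paths' := by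
          simp [midLoop, hg, hrun]
        rw [hstep]
        exact ih q' paths' k v hst

-- lock-step simulation of A's inner neighbor loop against the mid one
theorem inner_sim (target : String) (base : List String) :
    ∀ (l seen : List String) (paths : PySem.Dict String (List String)) (qB : List String),
      (∀ n, n ∈ seen ↔ paths.contains n = true) →
      paths.get? target = none →
      (∀ n ∈ qB, paths.contains n = true) →
      ∀ (paths' : PySem.Dict String (List String)) (q' : List String),
        midInner base l paths qB = (paths', q') →
        (∃ p, spInner target base l seen (qmap paths qB) = Sum.inl p ∧ paths'.get? target = some p)
        ∨ (∃ seen', spInner target base l seen (qmap paths qB) = Sum.inr (seen', qmap paths' q')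
            ∧ (∀ n, n ∈ seen' ↔ paths'.contains n = true)
            ∧ paths'.get? target = none
            ∧ (∀ n ∈ q', paths'.contains n = true)) := by
  intro l
  induction l with
  | nil =>
    intro seen paths qB hseen htgt hq paths' q' hrun
    simp [midInner] at hrun
    right
    refine ⟨seen, ?_, ?_, ?_, ?_⟩
    · simp [spInner, hrun.1, hrun.2]
    · rw [← hrun.1]; exact hseen
    · rw [← hrun.1]; exact htgt
    · rw [← hrun.1, ← hrun.2]; exact hq
  | cons n ns ih =>
    intro seen paths qB hseen htgt hq paths' q' hrun
    by_cases hc : paths.contains n = true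
    · -- neighbor already seen: both loops skip it
      have hs : n ∈ seen := (hseen n).mpr hc
      rw [midInner, if_pos hc] at hrun
      have hrec := ih seen paths qB hseen htgt hq paths' q' hrun
      simpa [spInner, hs] using hrec
    · have hcf : paths.contains n = false := by revert hc; cases paths.contains n <;> simp
      have hs : n ∉ seen := fun hm => by rw [(hseen n).mp hm] at hcf; exact Bool.noConfusion hcf
      have hgn : paths.get? n = none := by
        rw [PySem.Dict.contains_eq_isSome_get?] at hcf
        cases hg : paths.get? n with
        | none => rfl
        | some w => rw [hg] at hcf; simp at hcf
      rw [midInner, if_neg (by simp [hcf])] at hrun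
      by_cases ht : n = target
      · -- target discovered: A returns, the mid BFS records it and goes on
        left
        subst ht
        refine ⟨base ++ [n], ?_, ?_⟩
        · simp [spInner, hs]
        · have h0 : (paths.insert n (base ++ [n])).get? n = some (base ++ [n]) :=
            PySem.Dict.get?_insert_self _ _ _
          have hst := midInner_stable base ns (paths.insert n (base ++ [n])) (qB ++ [n]) n (base ++ [n]) h0
          rw [hrun] at hst; exact hst
      · -- fresh non-target neighbor: both append it
        have hmap : qmap (paths.insert n (base ++ [n])) (qB ++ [n]) = qmap paths qB ++ [(n, base ++ [n])] := by
          simp only [qmap, List.map_append, List.map_cons, List.map_nil]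
          congr 1
          · apply List.map_congr_left
            intro m hm
            have hmne : m ≠ n := by
              intro he
              rw [he] at hm
              exact absurd (hq n hm) (by simp [hcf])
            rw [PySem.Dict.get?_insert_of_ne _ _ hmne]
          · rw [PySem.Dict.get?_insert_self]; rfl
        have hseen' : ∀ m, m ∈ seen ++ [n] ↔ (paths.insert n (base ++ [n])).contains m = true := by
          intro m
          rw [PySem.Dict.contains_insert]
          by_cases hm : m = n
          · simp [hm]
          · simp [List.mem_append, hseen m, hm]
        have htgt' : (paths.insert n (base ++ [n])).get? target = none := by
          rw [PySem.Dict.get?_insert_of_ne _ _ (fun he => ht he.symm)]; exact htgt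
        have hq' : ∀ m ∈ qB ++ [n], (paths.insert n (base ++ [n])).contains m = true := by
          intro m hm
          rw [PySem.Dict.contains_insert]
          rcases List.mem_append.mp hm with h1 | h1
          · simp [hq m h1]
          · simp at h1; simp [h1]
        have hrec := ih (seen ++ [n]) (paths.insert n (base ++ [n])) (qB ++ [n]) hseen' htgt' hq' paths' q' hrun
        rw [hmap] at hrec
        simpa [spInner, hs, ht] using hrec

-- lock-step simulation of A's while-loop against the mid one (same fuel, same pop sequence)
theorem loop_eq (edges : List (String × List String)) (target : String) :
    ∀ (f : Nat) (qB : List String) (paths : PySem.Dict String (List String)) (seen : List String),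
      (∀ n, n ∈ seen ↔ paths.contains n = true) →
      paths.get? target = none →
      (∀ n ∈ qB, paths.contains n = true) →
      spLoop edges target f (qmap paths qB) seen = (midLoop edges f qB paths).get? target := by
  intro f
  induction f with
  | zero => intro qB paths seen _ htgt _; simp [spLoop, midLoop, htgt]
  | succ f ih =>
    intro qB paths seen hseen htgt hq
    cases qB with
    | nil => simp [qmap, spLoop, midLoop, htgt]
    | cons node qs =>
      have hqm : qmap paths (node :: qs) = (node, (paths.get? node).getD []) :: qmap paths qs := by
        simp [qmap]
      rw [hqm]
      cases hg : (PySem.Dict.mk edges).get? node with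
      | none => simp [spLoop, midLoop, hg, htgt]
      | some ns =>
        rcases hrun : midInner ((paths.get? node).getD []) (pvSortedStr ns) paths qs with ⟨paths', q'⟩
        have hsim := inner_sim target ((paths.get? node).getD []) (pvSortedStr ns) seen paths qs
          hseen htgt (fun m hm => hq m (List.mem_cons_of_mem _ hm)) paths' q' hrun
        have hB : midLoop edges (f + 1) (node :: qs) paths = midLoop edges f q' paths' := by
          simp [midLoop, hg, hrun]
        rcases hsim with ⟨p, hA, hp⟩ | ⟨seen', hA, hseen', htgt', hq'⟩
        · rw [hB]
          have hst := midLoop_stable edges f q' paths' target p hp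
          simp [spLoop, hg, hA, hst]
        · rw [hB]
          have hrec := ih q' paths' seen' hseen' htgt' hq'
          simp [spLoop, hg, hA, hrec]

-- A's per-target BFS result is exactly a lookup in the mid path dict
theorem shortest_path_eq (edges : List (String × List String)) (s t : String) :
    shortest_path edges s t = (mid_paths edges s).get? t := by
  have h0 : (PySem.Dict.empty.insert s [s]).get? s = some [s] := PySem.Dict.get?_insert_self _ _ _
  by_cases h : s = t
  · subst h
    have hst := midLoop_stable edges (pvFuel edges) [s] (PySem.Dict.empty.insert s [s]) s [s] h0
    simp [shortest_path, mid_paths, hst]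
  · have hts : t ≠ s := fun he => h he.symm
    have hqm : qmap (PySem.Dict.empty.insert s [s]) [s] = [(s, [s])] := by
      simp [qmap, h0]
    have hseen : ∀ n, n ∈ ([s] : List String) ↔ (PySem.Dict.empty.insert s [s]).contains n = true := by
      intro n
      rw [PySem.Dict.contains_insert]
      by_cases hn : n = s <;> simp [hn, PySem.Dict.contains_empty]
    have htgt : (PySem.Dict.empty.insert s [s]).get? t = none := by
      rw [PySem.Dict.get?_insert_of_ne _ _ hts]; simp [PySem.Dict.get?_empty]
    have hq : ∀ n ∈ ([s] : List String), (PySem.Dict.empty.insert s [s]).contains n = true := by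
      intro n hn; simp at hn; subst hn
      rw [PySem.Dict.contains_eq_isSome_get?, h0]; rfl
    have hle := loop_eq edges t (pvFuel edges) [s] (PySem.Dict.empty.insert s [s]) [s] hseen htgt hq
    rw [hqm] at hle
    simp [shortest_path, mid_paths, h, hle]

-- ===== relating B's parent BFS to the mid path dict =====

-- Invariant: parent has the same keys as paths, and each stored path is the parent chain of its key
def ChainInv (paths : PySem.Dict String (List String)) (parent : PySem.Dict String (Option String)) : Prop :=
  parent.keys = paths.keys ∧
  ∀ k v, paths.get? k = some v →
    v.length ≤ paths.keys.length ∧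
    ((parent.get? k = some none ∧ v = [k]) ∨
     (∃ nd v', parent.get? k = some (some nd) ∧ paths.get? nd = some v' ∧ v = v' ++ [k]))

theorem contains_eq_of_keys_eq {α β : Type} (d : PySem.Dict String α) (e : PySem.Dict String β)
    (h : d.keys = e.keys) (k : String) : d.contains k = e.contains k := by
  by_cases hm : k ∈ d.keys
  · rw [(PySem.Dict.contains_iff_mem_keys _ _).mpr hm, (PySem.Dict.contains_iff_mem_keys _ _).mpr (h ▸ hm)]
  · have h1 : d.contains k = false := by
      cases hc : d.contains k
      · rfl
      · exact absurd ((PySem.Dict.contains_iff_mem_keys _ _).mp hc) hm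
    have h2 : e.contains k = false := by
      cases hc : e.contains k
      · rfl
      · exact absurd (h ▸ (PySem.Dict.contains_iff_mem_keys _ _).mp hc) hm
    rw [h1, h2]

-- lock-step of the mid inner loop and B's parent inner fold
theorem inner_par (node : String) (base : List String) :
    ∀ (l : List String) (paths : PySem.Dict String (List String))
      (parent : PySem.Dict String (Option String)) (q : List String),
      ChainInv paths parent →
      paths.get? node = some base →
      (∀ n ∈ q, (paths.get? n).isSome = true) →
      ChainInv (midInner base l paths q).1
        (l.foldl (fun st n => if st.1.contains n then st else (st.1.insert n (some node), st.2 ++ [n])) (parent, q)).1 ∧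
      (midInner base l paths q).2
        = (l.foldl (fun st n => if st.1.contains n then st else (st.1.insert n (some node), st.2 ++ [n])) (parent, q)).2 ∧
      (∀ n ∈ (midInner base l paths q).2, ((midInner base l paths q).1.get? n).isSome = true) := by
  intro l
  induction l with
  | nil =>
    intro paths parent q hInv hnode hq
    exact ⟨by simpa [midInner] using hInv, by simp [midInner], by simpa [midInner] using hq⟩
  | cons n ns ih =>
    intro paths parent q hInv hnode hq
    have hck : parent.contains n = paths.contains n := contains_eq_of_keys_eq parent paths hInv.1 n
    by_cases hc : paths.contains n = true
    · have hrec := ih paths parent q hInv hnode hq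
      simpa [midInner, hc, List.foldl_cons, hck] using hrec
    · have hcf : paths.contains n = false := by revert hc; cases paths.contains n <;> simp
      have hpf : parent.contains n = false := by rw [hck]; exact hcf
      have hgn : paths.get? n = none := by
        rw [PySem.Dict.contains_eq_isSome_get?] at hcf
        cases hg : paths.get? n with
        | none => rfl
        | some w => rw [hg] at hcf; simp at hcf
      have hne_node : node ≠ n := by
        intro he; rw [← he, hnode] at hgn; simp at hgn
      -- new invariant after the twin inserts
      have hkeys : (parent.insert n (some node)).keys = (paths.insert n (base ++ [n])).keys := by
        rw [PySem.Dict.keys_insert_of_not_contains _ _ hpf,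
            PySem.Dict.keys_insert_of_not_contains _ _ hcf, hInv.1]
      have hInv' : ChainInv (paths.insert n (base ++ [n])) (parent.insert n (some node)) := by
        refine ⟨hkeys, ?_⟩
        intro k v hk
        have hlenkeys : (paths.insert n (base ++ [n])).keys.length = paths.keys.length + 1 := by
          rw [PySem.Dict.keys_insert_of_not_contains _ _ hcf, List.length_append]; rfl
        by_cases hkn : k = n
        · subst hkn
          rw [PySem.Dict.get?_insert_self] at hk
          obtain rfl : v = base ++ [k] := by injection hk with h; exact h.symm
          constructor
          · rw [hlenkeys, List.length_append]
            have := (hInv.2 node base hnode).1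
            simpa using Nat.add_le_add_right this 1
          · right
            refine ⟨node, base, ?_, ?_, rfl⟩
            · rw [PySem.Dict.get?_insert_self]
            · rw [PySem.Dict.get?_insert_of_ne _ _ hne_node]; exact hnode
        · rw [PySem.Dict.get?_insert_of_ne _ _ hkn] at hk
          obtain ⟨hlen, hchain⟩ := hInv.2 k v hk
          constructor
          · rw [hlenkeys]; exact Nat.le_succ_of_le hlen
          · rcases hchain with ⟨hp, hv⟩ | ⟨nd, v', hp, hv', hv⟩
            · left
              exact ⟨by rw [PySem.Dict.get?_insert_of_ne _ _ hkn]; exact hp, hv⟩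
            · right
              have hndn : nd ≠ n := by
                intro he; rw [he, hgn] at hv'; simp at hv'
              refine ⟨nd, v', ?_, ?_, hv⟩
              · rw [PySem.Dict.get?_insert_of_ne _ _ hkn]; exact hp
              · rw [PySem.Dict.get?_insert_of_ne _ _ hndn]; exact hv'
      have hnode' : (paths.insert n (base ++ [n])).get? node = some base := by
        rw [PySem.Dict.get?_insert_of_ne _ _ hne_node]; exact hnode
      have hq' : ∀ m ∈ q ++ [n], ((paths.insert n (base ++ [n])).get? m).isSome = true := by
        intro m hm
        rcases List.mem_append.mp hm with h1 | h1
        · by_cases hmn : m = n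
          · subst hmn; rw [PySem.Dict.get?_insert_self]; rfl
          · rw [PySem.Dict.get?_insert_of_ne _ _ hmn]; exact hq m h1
        · simp at h1; subst h1; rw [PySem.Dict.get?_insert_self]; rfl
      have hrec := ih (paths.insert n (base ++ [n])) (parent.insert n (some node)) (q ++ [n]) hInv' hnode' hq'
      simpa [midInner, hcf, List.foldl_cons, hck] using hrec

-- lock-step of the two while-loops
theorem loop_par (edges : List (String × List String)) :
    ∀ (f : Nat) (q : List String) (paths : PySem.Dict String (List String))
      (parent : PySem.Dict String (Option String)),
      ChainInv paths parent →
      (∀ n ∈ q, (paths.get? n).isSome = true) →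
      ChainInv (midLoop edges f q paths) (pbLoop edges f q parent) := by
  intro f
  induction f with
  | zero => intro q paths parent hInv _; simpa [midLoop, pbLoop] using hInv
  | succ f ih =>
    intro q paths parent hInv hq
    cases q with
    | nil => simpa [midLoop, pbLoop] using hInv
    | cons node qs =>
      cases hg : (PySem.Dict.mk edges).get? node with
      | none => simpa [midLoop, pbLoop, hg] using hInv
      | some ns =>
        obtain ⟨base, hbase⟩ : ∃ b, paths.get? node = some b := by
          have := hq node (List.mem_cons_self)
          cases hb : paths.get? node with
          | none => rw [hb] at this; simp at this
          | some b => exact ⟨b, rfl⟩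
        have hqs : ∀ n ∈ qs, (paths.get? n).isSome = true :=
          fun n hn => hq n (List.mem_cons_of_mem _ hn)
        obtain ⟨hI, hQ, hq'⟩ := inner_par node base (pvSortedStr ns) paths parent qs hInv hbase hqs
        rcases hrun : midInner base (pvSortedStr ns) paths qs with ⟨paths', q'⟩
        rw [hrun] at hI hQ hq'
        have hstepM : midLoop edges (f + 1) (node :: qs) paths = midLoop edges f q' paths' := by
          simp [midLoop, hg, hbase, hrun]
        have hstepP : pbLoop edges (f + 1) (node :: qs) parent
            = pbLoop edges f
              ((pvSortedStr ns).foldl (fun st n => if st.1.contains n then st else (st.1.insert n (some node), st.2 ++ [n])) (parent, qs)).2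
              ((pvSortedStr ns).foldl (fun st n => if st.1.contains n then st else (st.1.insert n (some node), st.2 ++ [n])) (parent, qs)).1 := by
          simp [pbLoop, hg]
        rw [hstepM, hstepP, ← hQ]
        exact ih q' paths' _ hI hq'

-- rebuilding the parent chain of a stored path yields exactly that path
theorem rbGo_eq (paths : PySem.Dict String (List String)) (parent : PySem.Dict String (Option String))
    (hInv : ChainInv paths parent) :
    ∀ (f : Nat) (t : String) (v acc : List String),
      paths.get? t = some v → v.length ≤ f →
      rbGo parent f (some t) acc = v ++ acc := by
  intro f
  induction f with
  | zero =>
    intro t v acc hv hlen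
    obtain ⟨_, hchain⟩ := hInv.2 t v hv
    rcases hchain with ⟨_, hv'⟩ | ⟨nd, v', _, _, hv'⟩ <;> subst hv' <;> simp at hlen
  | succ f ih =>
    intro t v acc hv hlen
    obtain ⟨_, hchain⟩ := hInv.2 t v hv
    rcases hchain with ⟨hp, hv'⟩ | ⟨nd, v', hp, hnd, hv'⟩
    · subst hv'
      cases f <;> simp [rbGo, hp]
    · subst hv'
      have hlen' : v'.length ≤ f := by
        simpa using Nat.lt_succ_iff.mp (Nat.lt_of_lt_of_le (by simp) hlen)
      have := ih nd v' (t :: acc) hnd hlen'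
      simp [rbGo, hp, this]

-- B's per-source lookup (contains + rebuild) is exactly a lookup in the mid path dict
theorem parent_lookup (edges : List (String × List String)) (s t : String) :
    (if (bfs_parents edges s).contains t then some (rebuild (bfs_parents edges s) t) else none)
      = (mid_paths edges s).get? t := by
  have hInv0 : ChainInv (PySem.Dict.empty.insert s [s]) (PySem.Dict.empty.insert s none) := by
    constructor
    · rw [PySem.Dict.keys_insert_of_not_contains _ _ (PySem.Dict.contains_empty s),
          PySem.Dict.keys_insert_of_not_contains _ _ (PySem.Dict.contains_empty s)]
      rfl
    · intro k v hk
      by_cases hks : k = s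
      · subst hks
        rw [PySem.Dict.get?_insert_self] at hk
        obtain rfl : v = [k] := by injection hk with h; exact h.symm
        refine ⟨?_, Or.inl ⟨PySem.Dict.get?_insert_self _ _ _, rfl⟩⟩
        rw [PySem.Dict.keys_insert_of_not_contains _ _ (PySem.Dict.contains_empty k)]
        simp [PySem.Dict.keys_empty]
      · rw [PySem.Dict.get?_insert_of_ne _ _ hks, PySem.Dict.get?_empty] at hk
        simp at hk
  have hq0 : ∀ n ∈ ([s] : List String), ((PySem.Dict.empty.insert s [s]).get? n).isSome = true := by
    intro n hn; simp at hn; subst hn; rw [PySem.Dict.get?_insert_self]; rfl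
  have hInv : ChainInv (mid_paths edges s) (bfs_parents edges s) :=
    loop_par edges (pvFuel edges) [s] _ _ hInv0 hq0
  have hck : (bfs_parents edges s).contains t = (mid_paths edges s).contains t :=
    contains_eq_of_keys_eq _ _ hInv.1 t
  by_cases hc : (mid_paths edges s).contains t = true
  · obtain ⟨v, hv⟩ : ∃ v, (mid_paths edges s).get? t = some v := by
      rw [PySem.Dict.contains_eq_isSome_get?] at hc
      cases hg : (mid_paths edges s).get? t with
      | none => rw [hg] at hc; simp at hc
      | some v => exact ⟨v, rfl⟩
    have hlen : v.length ≤ (bfs_parents edges s).keys.length + 1 := by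
      rw [hInv.1]
      exact Nat.le_succ_of_le (hInv.2 t v hv).1
    have := rbGo_eq (mid_paths edges s) (bfs_parents edges s) hInv
      ((bfs_parents edges s).keys.length + 1) t v [] hv hlen
    rw [hck, if_pos hc, hv, rebuild, this]
    simp
  · have hcf : (mid_paths edges s).contains t = false := by revert hc; cases (mid_paths edges s).contains t <;> simp
    have hgn : (mid_paths edges s).get? t = none := by
      rw [PySem.Dict.contains_eq_isSome_get?] at hcf
      cases hg : (mid_paths edges s).get? t with
      | none => rfl
      | some w => rw [hg] at hcf; simp at hcf
    rw [hck, if_neg (by simp [hcf]), hgn]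

-- ===== fold bookkeeping =====

-- a foldl whose function ignores the list element is the identity
theorem foldl_keep {α β : Type} : ∀ (l : List α) (b : β), l.foldl (fun b _ => b) b = b := by
  intro l
  induction l with
  | nil => intro b; rfl
  | cons x xs ih => intro b; simp [List.foldl_cons, ih]

-- A's inner fold is a pickBest fold over the hits
theorem foldl_match_filterMap (g : String → Option (List String)) :
    ∀ (T : List String) (b : Option (List String)),
      T.foldl (fun b t => match g t with | none => b | some p => pickBest b p) b
        = (T.filterMap g).foldl pickBest b := by
  intro T
  induction T with
  | nil => intro b; rfl
  | cons t ts ih =>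
    intro b
    cases hg : g t <;> simp [List.foldl_cons, hg, ih]

-- B's candidate-building fold appends the hits
theorem foldl_build_filterMap (g : String → Option (List String)) :
    ∀ (T : List String) (c : List (List String)),
      T.foldl (fun c t => match g t with | none => c | some p => c ++ [p]) c
        = c ++ T.filterMap g := by
  intro T
  induction T with
  | nil => intro c; simp
  | cons t ts ih =>
    intro c
    cases hg : g t with
    | none => simp [List.foldl_cons, hg, ih]
    | some p => simp [List.foldl_cons, hg, ih]

-- folding source by source equals folding the concatenation
theorem foldl_flatMap (L : String → List (List String)) :
    ∀ (S : List String) (b : Option (List String)),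
      S.foldl (fun b s => (L s).foldl pickBest b) b = (S.flatMap L).foldl pickBest b := by
  intro S
  induction S with
  | nil => intro b; rfl
  | cons s ss ih => intro b; simp [List.foldl_cons, List.flatMap_cons, List.foldl_append, ih]

-- building candidates source by source builds the concatenation
theorem build_flatMap (L : String → List (List String)) :
    ∀ (S : List String) (c : List (List String)),
      S.foldl (fun c s => c ++ L s) c = c ++ S.flatMap L := by
  intro S
  induction S with
  | nil => intro c; simp
  | cons s ss ih => intro c; simp [List.foldl_cons, List.flatMap_cons, ih]

-- ===== VERDICT (by name: the statement is the Claim_ definition above) =====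
theorem shortest_group_path_spec : Claim_equal_shortest_group_path := by
  intro edges modules package source_group target_group _ _
  unfold Spec_shortest_group_path shortest_group_path shortest_group_path_alt
  set S := pvSortedStr (modules.filter (fun m => module_group m package == source_group)) with hS
  set T := pvSortedStr (modules.filter (fun m => module_group m package == target_group)) with hT
  by_cases hSe : S.isEmpty
  · rw [List.isEmpty_iff] at hSe; rw [hSe]; simp
  · by_cases hTe : T.isEmpty
    · rw [List.isEmpty_iff] at hTe; rw [hTe]
      simp only [List.foldl_nil]
      rw [foldl_keep]
      simp
    · rw [if_neg (by simp [hSe, hTe])]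
      -- A's side: rewrite each per-pair BFS as a mid-dict lookup, then flatten the nested fold
      have hA : S.foldl (fun best s =>
          T.foldl (fun best t =>
            match shortest_path edges s t with
            | none => best
            | some p => pickBest best p) best) none
          = (S.flatMap (fun s => T.filterMap (fun t => (mid_paths edges s).get? t))).foldl pickBest none := by
        rw [← foldl_flatMap]
        congr 1
        funext b s
        rw [← foldl_match_filterMap]
        congr 1
        funext b t
        rw [shortest_path_eq]
      -- B's side: the candidate list is the same concatenation of hits
      have hC : S.foldl (fun cand s =>
          let parent := bfs_parents edges s
          T.foldl (fun cand t =>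
            if parent.contains t then cand ++ [rebuild parent t] else cand) cand) []
          = S.flatMap (fun s => T.filterMap (fun t => (mid_paths edges s).get? t)) := by
        have hbody : ∀ (s : String) (cand : List (List String)),
            T.foldl (fun cand t =>
              if (bfs_parents edges s).contains t then cand ++ [rebuild (bfs_parents edges s) t] else cand) cand
              = cand ++ T.filterMap (fun t => (mid_paths edges s).get? t) := by
          intro s cand
          rw [← foldl_build_filterMap]
          congr 1
          funext c t
          rw [← parent_lookup edges s t]
          cases hc : (bfs_parents edges s).contains t <;> simp
        calc S.foldl (fun cand s =>
              let parent := bfs_parents edges s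
              T.foldl (fun cand t =>
                if parent.contains t then cand ++ [rebuild parent t] else cand) cand) []
            = S.foldl (fun cand s => cand ++ T.filterMap (fun t => (mid_paths edges s).get? t)) [] := by
              congr 1
              funext cand s
              exact hbody s cand
          _ = S.flatMap (fun s => T.filterMap (fun t => (mid_paths edges s).get? t)) := by
              rw [build_flatMap]; rfl
      rw [hA, hC]
      rfl
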